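-- pv_equiv track=rewrite | github.com/RohanOMalley/PythonProjectsCurrent | MoreDifficultRecursion/annoying_recursion.py | annoying_climbUp
-- ===== SOURCE A (Python) =====
-- def annoying_climbUp(n):
--     if n == 0:
--         return []
--     elif n == 1:
--         return [1]
--     elif n == 2:
--         return [1,2]
--     elif n == 3:
--         return [1,2,3]
--     elif n == 4:
--         return annoying_climbUp(3) + [4]
--     elif n == 5:
--         return annoying_climbUp(4) + [5]
--     elif n == 6:
--         return annoying_climbUp(5) + [6]
--     elif n >= 7:
--         return annoying_climbUp(n-1) + [n]
-- ===== SOURCE B (Python) =====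
-- def annoying_climbUp(n):
--     result = []
--     for i in range(1, n + 1):
--         result.append(i)
--     return result
-- ===== Notes on version B (the rewrite author's own statement) =====
-- stated objective: simpler
-- what changed: Replaces the recursion with hard-coded base cases and list concatenation by a single iterative loop appending to an accumulator.
-- outside the precondition, e.g. on annoying_climbUp(-1): A returns None, B returns []
import Mathlib
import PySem

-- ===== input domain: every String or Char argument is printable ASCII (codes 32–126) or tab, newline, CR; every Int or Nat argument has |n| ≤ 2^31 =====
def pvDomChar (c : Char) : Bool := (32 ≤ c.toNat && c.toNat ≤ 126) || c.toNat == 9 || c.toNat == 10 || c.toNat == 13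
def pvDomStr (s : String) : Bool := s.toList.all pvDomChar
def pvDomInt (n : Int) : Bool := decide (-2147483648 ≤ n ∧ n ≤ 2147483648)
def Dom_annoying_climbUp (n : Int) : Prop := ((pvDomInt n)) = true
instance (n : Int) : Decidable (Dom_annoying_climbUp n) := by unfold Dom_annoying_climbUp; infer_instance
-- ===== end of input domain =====

-- B replaces A's recursion (with hard-coded base cases and concatenation) by one iterative loop with an accumulator; simpler.

-- ===== PORT A =====
def annoying_climbUp (n : Int) : List Int :=
  if n = 0 then []
  else if n = 1 then [1]
  else if n = 2 then [1, 2]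
  else if n = 3 then [1, 2, 3]
  else if n = 4 then annoying_climbUp 3 ++ [4]
  else if n = 5 then annoying_climbUp 4 ++ [5]
  else if n = 6 then annoying_climbUp 5 ++ [6]
  else if n ≥ 7 then annoying_climbUp (n - 1) ++ [n]
  else []  -- Python falls off and returns None here (n < 0); excluded by Pre_
termination_by n.toNat
decreasing_by all_goals (simp_wf; omega)

-- ===== PORT B =====
def annoying_climbUp_alt (n : Int) : List Int :=
  (PySem.List.pyRange 1 (n + 1) 1).foldl (fun acc i => acc ++ [i]) []

-- ===== PRECONDITION & SPEC =====
-- Pre_ excludes n < 0, where Python A returns None (no List value); B returns [] there.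
-- It also excludes large n, where A's depth-n recursion overflows the interpreter's recursion limit and raises RecursionError
-- (the bound 9900 stays safely under the harness's limit of 10000 frames).
def Pre_annoying_climbUp (n : Int) : Prop := 0 ≤ n ∧ n ≤ 9900
instance (n : Int) : Decidable (Pre_annoying_climbUp n) := by unfold Pre_annoying_climbUp; infer_instance
def pvWitness_annoying_climbUp : Int := (5)

def Spec_annoying_climbUp (n : Int) (out : List Int) : Prop := out = annoying_climbUp_alt n
instance (n : Int) (out : List Int) : Decidable (Spec_annoying_climbUp n out) := by unfold Spec_annoying_climbUp; infer_instance

-- ===== CLAIM (what is proved, stated in full; the proofs are below) =====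
def Claim_equal_annoying_climbUp : Prop := ∀ (n : Int), Dom_annoying_climbUp n → Pre_annoying_climbUp n → Spec_annoying_climbUp n (annoying_climbUp n)

-- ===== LEMMAS AND PROOFS =====

-- the accumulator loop of B just appends its input list
theorem foldl_snoc (l : List Int) (init : List Int) :
    l.foldl (fun acc i => acc ++ [i]) init = init ++ l := by
  induction l generalizing init with
  | nil => simp
  | cons x xs ih => simp [List.foldl, ih]

theorem alt_eq_range (n : Int) : annoying_climbUp_alt n = PySem.List.pyRange 1 (n + 1) 1 := by
  unfold annoying_climbUp_alt
  rw [foldl_snoc]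
  simp

theorem a_small (k : Int) (hk : 0 ≤ k) (hk3 : k ≤ 3) :
    annoying_climbUp k = PySem.List.pyRange 1 (k + 1) 1 := by
  interval_cases k <;>
    (rw [annoying_climbUp]; norm_num [PySem.List.pyRange_one, List.range_succ]) <;> decide

theorem a_step (n : Int) (h : 4 ≤ n) :
    annoying_climbUp n = annoying_climbUp (n - 1) ++ [n] := by
  rw [annoying_climbUp]
  split_ifs with h0 h1 h2 h3 h4 h5 h6 h7
  · omega
  · omega
  · omega
  · omega
  · subst h4; norm_num
  · subst h5; norm_num
  · subst h6; norm_num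
  · rfl
  · omega

theorem a_eq_range (k : Nat) : annoying_climbUp (k : Int) = PySem.List.pyRange 1 ((k : Int) + 1) 1 := by
  induction k with
  | zero => exact a_small 0 (by norm_num) (by norm_num)
  | succ m ih =>
    by_cases h : 3 ≤ m
    · have h4 : (4 : Int) ≤ ((m : Int) + 1) := by omega
      rw [show ((m + 1 : Nat) : Int) = (m : Int) + 1 by push_cast; ring,
          a_step _ h4]
      have he : (m : Int) + 1 - 1 = (m : Int) := by ring
      rw [he, ih, PySem.List.pyRange_one_succ_right (a := 1) (b := (m : Int) + 1) (by omega)]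
    · exact a_small _ (by positivity) (by push_cast; omega)

-- ===== VERDICT (by name: the statement is the Claim_ definition above) =====
theorem annoying_climbUp_spec : Claim_equal_annoying_climbUp := by
  intro n _ hpre
  have hpre' : 0 ≤ n := hpre.1
  unfold Spec_annoying_climbUp
  obtain ⟨k, rfl⟩ : ∃ k : Nat, n = (k : Int) := ⟨n.toNat, by omega⟩
  rw [alt_eq_range, a_eq_range]
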